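-- pv_equiv track=rewrite | github.com/alexspetty/nfield | experiments/span_test.py | compute_S_table
-- ===== SOURCE A (Python) =====
-- def is_prime(n):
--     if n < 2: return False
--     if n < 4: return True
--     if n % 2 == 0 or n % 3 == 0: return False
--     i = 5
--     while i * i <= n:
--         if n % i == 0 or n % (i + 2) == 0: return False
--         i += 6
--     return True
--
-- def collision_count(g, p, b):
--     count = 0
--     for r in range(1, p):
--         d_r = b * r // p
--         gr = (g * r) % p
--         d_gr = b * gr // p
--         if d_r == d_gr:
--             count += 1
--     return count
--
-- def compute_S_table(b, max_p=5000):
--     """Compute S(a) for all coprime a mod b^2."""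
--     m = b * b
--     table = {}
--     for p in range(m + 1, max_p):
--         if not is_prime(p) or p % b == 0:
--             continue
--         a = p % m
--         if a in table:
--             continue
--         g = pow(b, 1, p)
--         C = collision_count(g, p, b)
--         Q = (p - 1) // b
--         table[a] = C - Q
--     return table, m
-- ===== SOURCE B (Python) =====
-- def _rint(num_lo, num_hi, c):
--     # the interval {r : num_lo <= c*r <= num_hi} for c != 0, as (lo, hi)
--     if c > 0:
--         return -((-num_lo) // c), num_hi // c
--     return -((-num_hi) // c), num_lo // c
--
-- def compute_S_table(b, max_p=5000):
--     """Compute S(a) for all coprime a mod b^2."""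
--     m = b * b
--     table = {}
--     if max_p <= m + 1:
--         return table, m  # no candidate p in range(m + 1, max_p)
--     primes = []  # all primes found so far, in increasing order
--     for p in range(2, max_p):
--         # trial-divide only by the already-found primes, up to sqrt(p)
--         composite = False
--         for q in primes:
--             if q * q > p:
--                 break
--             if p % q == 0:
--                 composite = True
--                 break
--         if composite:
--             continue
--         primes.append(p)
--         if p <= m or p % b == 0:
--             continue
--         a = p % m
--         if a in table:
--             continue
--         # closed-form collision count: r collides iff, with d = (b*r)//p,
--         # d*p*(b+1) <= b*b*r <= d*p*(b+1) + p - 1; sum interval lengths over d.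
--         C = 0
--         # d ranges over the possible values of (b*r)//p for 0 < r < p
--         for d in (range(0, b) if b > 0 else range(b, 0)):
--             l1, h1 = _rint(d * p, (d + 1) * p - 1, b)
--             l2, h2 = _rint(d * p * (b + 1), d * p * (b + 1) + p - 1, m)
--             lo = max(1, l1, l2)
--             hi = min(p - 1, h1, h2)
--             if lo <= hi:
--                 C += hi - lo + 1
--         table[a] = C - (p - 1) // b
--     return table, m
-- ===== Notes on version B (the rewrite author's own statement) =====
-- stated objective: faster
-- what changed: The O(p) per-prime collision loop is replaced by a closed-form count: for each of the at most |b| possible values d of (b*r)//p, the colliding r form an interval computed by ceiling/floor division, so C is a sum of |b| interval-intersection lengths; primality is decided by trial division against the growing list of already-found primes instead of an independent 6k+-1 test per candidate.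
import Mathlib
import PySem

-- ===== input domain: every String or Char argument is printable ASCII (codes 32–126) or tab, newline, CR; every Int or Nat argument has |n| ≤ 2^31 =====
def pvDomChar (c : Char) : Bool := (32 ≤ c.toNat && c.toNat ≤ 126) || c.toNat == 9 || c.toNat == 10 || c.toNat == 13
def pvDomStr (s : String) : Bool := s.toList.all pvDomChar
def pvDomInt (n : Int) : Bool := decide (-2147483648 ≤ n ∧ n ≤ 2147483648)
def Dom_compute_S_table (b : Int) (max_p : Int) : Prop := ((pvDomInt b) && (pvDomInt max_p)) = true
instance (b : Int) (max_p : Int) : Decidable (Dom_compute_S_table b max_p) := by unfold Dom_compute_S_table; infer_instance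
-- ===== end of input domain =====

-- B replaces A's per-residue O(p) collision loop by a closed-form sum of ≤|b| interval lengths
-- (one per value of (b*r)//p) and A's per-candidate 6k±1 trial division by trial division
-- against the growing list of already-found primes; same results on Pre_.


-- ===== PORT A =====
def is_prime_loop (n i : Int) : Bool :=
  if h : i * i ≤ n then
    if PySem.Int.mod n i == 0 || PySem.Int.mod n (i + 2) == 0 then false
    else is_prime_loop n (i + 6)
  else true
termination_by (n + 1 - i).toNat
decreasing_by
  have hi : i ≤ n := by nlinarith [mul_self_nonneg (i - 1), mul_self_nonneg i]
  omega

def is_prime (n : Int) : Bool :=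
  if n < 2 then false
  else if n < 4 then true
  else if PySem.Int.mod n 2 == 0 || PySem.Int.mod n 3 == 0 then false
  else is_prime_loop n 5

def collision_count (g p b : Int) : Int :=
  (PySem.List.pyRange 1 p 1).foldl (fun count r =>
    let d_r := PySem.Int.floordiv (b * r) p
    let gr := PySem.Int.mod (g * r) p
    let d_gr := PySem.Int.floordiv (b * gr) p
    if d_r == d_gr then count + 1 else count) 0

def compute_S_table (b : Int) (max_p : Int) : (List (Int × Int)) × Int :=
  let m := b * b
  let table :=
    (PySem.List.pyRange (m + 1) max_p 1).foldl (fun (table : PySem.Dict Int Int) p =>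
      if !is_prime p || PySem.Int.mod p b == 0 then table
      else
        let a := PySem.Int.mod p m
        if table.contains a then table
        else
          let g := PySem.Int.powMod b 1 p
          let C := collision_count g p b
          let Q := PySem.Int.floordiv (p - 1) b
          table.insert a (C - Q)) PySem.Dict.empty
  (table.items, m)

-- ===== PORT B =====
def trial_composite (primes : List Int) (p : Int) : Bool :=
  match primes with
  | [] => false
  | q :: qs =>
    if q * q > p then false
    else if PySem.Int.mod p q == 0 then true
    else trial_composite qs p

-- the interval {r : num_lo <= c*r <= num_hi} for c ≠ 0, as (lo, hi); ceil(x/c) = -((-x)//c)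
def rint (num_lo num_hi c : Int) : Int × Int :=
  if c > 0 then (-(PySem.Int.floordiv (-num_lo) c), PySem.Int.floordiv num_hi c)
  else (-(PySem.Int.floordiv (-num_hi) c), PySem.Int.floordiv num_lo c)

-- the possible values of (b*r)//p for 0 < r < p
def dsOf (b : Int) : List Int :=
  if b > 0 then PySem.List.pyRange 0 b 1 else PySem.List.pyRange b 0 1

-- closed-form collision count: r collides iff, with d = (b*r)//p,
-- d*p*(b+1) <= b*b*r <= d*p*(b+1) + p - 1; sum interval-intersection lengths over d
def closedC (b m p : Int) : Int :=
  (dsOf b).foldl (fun C d =>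
    let i1 := rint (d * p) ((d + 1) * p - 1) b
    let i2 := rint (d * p * (b + 1)) (d * p * (b + 1) + p - 1) m
    let lo := max 1 (max i1.1 i2.1)
    let hi := min (p - 1) (min i1.2 i2.2)
    if lo ≤ hi then C + (hi - lo + 1) else C) 0

def compute_S_table_alt (b : Int) (max_p : Int) : (List (Int × Int)) × Int :=
  let m := b * b
  if max_p ≤ m + 1 then ((PySem.Dict.empty : PySem.Dict Int Int).items, m)  -- no candidate p
  else
  let st :=
    (PySem.List.pyRange 2 max_p 1).foldl
      (fun (st : List Int × PySem.Dict Int Int) p =>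
        if trial_composite st.1 p then st
        else
          let primes := st.1 ++ [p]
          if p ≤ m || PySem.Int.mod p b == 0 then (primes, st.2)
          else
            let a := PySem.Int.mod p m
            if st.2.contains a then (primes, st.2)
            else
              let C := closedC b m p
              (primes, st.2.insert a (C - PySem.Int.floordiv (p - 1) b)))
      ([], PySem.Dict.empty)
  (st.2.items, m)

-- ===== PRECONDITION & SPEC =====
-- Pre_ excludes only b = 0 with max_p ≥ 3, where both programs hit p % 0 and raise ZeroDivisionError.
def Pre_compute_S_table (b : Int) (max_p : Int) : Prop := b ≠ 0 ∨ max_p ≤ 2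
instance (b : Int) (max_p : Int) : Decidable (Pre_compute_S_table b max_p) := by unfold Pre_compute_S_table; infer_instance
def pvWitness_compute_S_table : Int × Int := (2, 60)

def Spec_compute_S_table (b : Int) (max_p : Int) (out : (List (Int × Int)) × Int) : Prop := out = compute_S_table_alt b max_p
instance (b : Int) (max_p : Int) (out : (List (Int × Int)) × Int) : Decidable (Spec_compute_S_table b max_p out) := by unfold Spec_compute_S_table; infer_instance

-- ===== CLAIM (what is proved, stated in full; the proofs are below) =====
def Claim_equal_compute_S_table : Prop := ∀ (b : Int) (max_p : Int), Dom_compute_S_table b max_p → Pre_compute_S_table b max_p → Spec_compute_S_table b max_p (compute_S_table b max_p)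

-- ===== LEMMAS AND PROOFS =====

-- "n has no divisor d with 2 ≤ d and d*d ≤ n"
def smallFree (n : Int) : Prop := ∀ d : Int, 2 ≤ d → d * d ≤ n → ¬ d ∣ n

lemma lt_of_sq_lt_sq (d i n : Int) (hd : 0 ≤ d) (hdd : d * d ≤ n) (hii : ¬ i * i ≤ n) (hi : 0 ≤ i) :
    d < i := by
  by_contra h
  push Not at h
  have := mul_le_mul h h hi hd
  omega

lemma loop_iff (n : Int) (h2 : ¬ (2:Int) ∣ n) (h3 : ¬ (3:Int) ∣ n) :
    ∀ (k : Nat) (i : Int), (n + 1 - i).toNat ≤ k → 5 ≤ i → i % 6 = 5 →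
      (∀ d : Int, 2 ≤ d → d < i → ¬ d ∣ n) →
      (is_prime_loop n i = true ↔ smallFree n) := by
  intro k
  induction k with
  | zero =>
    intro i hk h5 _ hnd
    have hgt : ¬ i * i ≤ n := by
      intro hle
      have hii : i ≤ i * i := by nlinarith
      omega
    rw [is_prime_loop, dif_neg hgt]
    refine iff_of_true rfl ?_
    intro d hd hdd
    exact hnd d hd (lt_of_sq_lt_sq d i n (by omega) hdd hgt (by omega))
  | succ k ih =>
    intro i hk h5 h6 hnd
    rw [is_prime_loop]
    by_cases hle : i * i ≤ n
    · rw [dif_pos hle]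
      by_cases hdi : i ∣ n
      · have e1 : (PySem.Int.mod n i == 0) = true := by
          simp only [beq_iff_eq, PySem.Int.mod_eq_zero_iff_dvd]
          exact hdi
        rw [e1]
        simp only [Bool.true_or, if_true]
        exact iff_of_false (by simp) (fun h => h i (by omega) hle hdi)
      · have e1 : (PySem.Int.mod n i == 0) = false := by
          simp only [beq_eq_false_iff_ne, ne_eq, PySem.Int.mod_eq_zero_iff_dvd]
          exact hdi
        by_cases hdi2 : (i + 2) ∣ n
        · have e2 : (PySem.Int.mod n (i + 2) == 0) = true := by
            simp only [beq_iff_eq, PySem.Int.mod_eq_zero_iff_dvd]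
            exact hdi2
          rw [e1, e2]
          simp only [Bool.or_true, if_true]
          refine iff_of_false (by simp) (fun h => ?_)
          by_cases hbig : (i + 2) * (i + 2) ≤ n
          · exact h (i + 2) (by omega) hbig hdi2
          · obtain ⟨c, hc⟩ := hdi2
            have hn25 : 25 ≤ n := by nlinarith
            have hcpos : 0 < c := by nlinarith
            have hclt : c < i + 2 := by nlinarith
            have hc2 : 2 ≤ c := by nlinarith
            have hcc : c * c ≤ n := by nlinarith
            exact h c hc2 hcc ⟨i + 2, by rw [hc]; ring⟩
        · have e2 : (PySem.Int.mod n (i + 2) == 0) = false := by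
            simp only [beq_eq_false_iff_ne, ne_eq, PySem.Int.mod_eq_zero_iff_dvd]
            exact hdi2
          rw [e1, e2]
          simp only [Bool.or_self, Bool.false_eq_true, if_false]
          have hin : i ≤ n := by nlinarith
          refine ih (i + 6) (by omega) (by omega) (by omega) ?_
          intro d hd hlt hdvd
          rcases (by omega : d < i ∨ d = i ∨ d = i + 2 ∨ (2:Int) ∣ d ∨ (3:Int) ∣ d) with h' | h' | h' | h' | h'
          · exact hnd d hd h' hdvd
          · exact hdi (h' ▸ hdvd)
          · exact hdi2 (h' ▸ hdvd)
          · exact h2 (dvd_trans h' hdvd)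
          · exact h3 (dvd_trans h' hdvd)
    · rw [dif_neg hle]
      refine iff_of_true rfl ?_
      intro d hd hdd
      exact hnd d hd (lt_of_sq_lt_sq d i n (by omega) hdd hle (by omega))

lemma is_prime_iff (n : Int) (hn : 2 ≤ n) :
    is_prime n = true ↔ smallFree n := by
  rw [is_prime, if_neg (by omega : ¬ n < 2)]
  by_cases h4 : n < 4
  · rw [if_pos h4]
    refine iff_of_true rfl ?_
    intro d hd hdd hdvd
    nlinarith
  · rw [if_neg h4]
    by_cases hd2 : (2:Int) ∣ n
    · have e1 : (PySem.Int.mod n 2 == 0) = true := by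
        simp only [beq_iff_eq, PySem.Int.mod_eq_zero_iff_dvd]
        exact hd2
      rw [e1]
      simp only [Bool.true_or, if_true]
      exact iff_of_false (by simp) (fun h => h 2 (by omega) (by omega) hd2)
    · have e1 : (PySem.Int.mod n 2 == 0) = false := by
        simp only [beq_eq_false_iff_ne, ne_eq, PySem.Int.mod_eq_zero_iff_dvd]
        exact hd2
      by_cases hd3 : (3:Int) ∣ n
      · have e2 : (PySem.Int.mod n 3 == 0) = true := by
          simp only [beq_iff_eq, PySem.Int.mod_eq_zero_iff_dvd]
          exact hd3
        rw [e1, e2]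
        simp only [Bool.or_true, if_true]
        refine iff_of_false (by simp) (fun h => ?_)
        by_cases h9 : 9 ≤ n
        · exact h 3 (by omega) (by omega) hd3
        · omega
      · have e2 : (PySem.Int.mod n 3 == 0) = false := by
          simp only [beq_eq_false_iff_ne, ne_eq, PySem.Int.mod_eq_zero_iff_dvd]
          exact hd3
        rw [e1, e2]
        simp only [Bool.or_self, Bool.false_eq_true, if_false]
        have h5n : 5 ≤ n := by omega
        refine loop_iff n hd2 hd3 (n + 1 - 5).toNat 5 (by omega) (by omega) (by norm_num) ?_
        intro d hd hlt hdvd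
        rcases (by omega : d = 2 ∨ d = 3 ∨ d = 4) with h' | h' | h'
        · exact hd2 (h' ▸ hdvd)
        · exact hd3 (h' ▸ hdvd)
        · exact hd2 (dvd_trans (by norm_num) (h' ▸ hdvd))

lemma trial_composite_false (p : Int) (primes : List Int)
    (h : ∀ q ∈ primes, q * q ≤ p → ¬ q ∣ p) :
    trial_composite primes p = false := by
  induction primes with
  | nil => rfl
  | cons q qs ih =>
    rw [trial_composite]
    by_cases hq : q * q > p
    · rw [if_pos hq]
    · rw [if_neg hq]
      have hnd : (PySem.Int.mod p q == 0) = false := by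
        simp only [beq_eq_false_iff_ne, ne_eq, PySem.Int.mod_eq_zero_iff_dvd]
        exact h q (by simp) (by omega)
      rw [hnd]
      simp only [Bool.false_eq_true, if_false]
      exact ih (fun x hx hxx => h x (by simp [hx]) hxx)

lemma trial_composite_true (p : Int) (primes : List Int) (q : Int)
    (hsort : primes.Pairwise (· < ·)) (h2 : ∀ x ∈ primes, 2 ≤ x)
    (hq : q ∈ primes) (hqq : q * q ≤ p) (hdvd : q ∣ p)
    (hmin : ∀ x ∈ primes, x < q → ¬ x ∣ p) :
    trial_composite primes p = true := by
  induction primes with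
  | nil => cases hq
  | cons a as ih =>
    rw [trial_composite]
    have ha2 : 2 ≤ a := h2 a (by simp)
    rcases List.mem_cons.mp hq with heq | hq'
    · subst heq
      rw [if_neg (by omega), (PySem.Int.mod_eq_zero_iff_dvd p q).mpr hdvd]
      simp
    · have haq : a < q := (List.pairwise_cons.mp hsort).1 q hq'
      have haa : a * a ≤ p := by nlinarith [h2 q (by simp [hq'])]
      rw [if_neg (by omega)]
      have hna : (PySem.Int.mod p a == 0) = false := by
        simp only [beq_eq_false_iff_ne, ne_eq, PySem.Int.mod_eq_zero_iff_dvd]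
        exact hmin a (by simp) haq
      rw [hna]
      simp only [Bool.false_eq_true, if_false]
      exact ih (List.pairwise_cons.mp hsort).2 (fun x hx => h2 x (by simp [hx])) hq'
        (fun x hx hxq => hmin x (by simp [hx]) hxq)

-- the canonical list of primes below t, in increasing order
def primesUpto (t : Int) : List Int := (PySem.List.pyRange 2 t 1).filter is_prime

lemma mem_primesUpto (t x : Int) : x ∈ primesUpto t ↔ (2 ≤ x ∧ x < t) ∧ is_prime x = true := by
  simp [primesUpto, List.mem_filter, PySem.List.mem_pyRange_one]

lemma pairwise_primesUpto (t : Int) : (primesUpto t).Pairwise (· < ·) :=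
  List.Pairwise.sublist List.filter_sublist (PySem.List.pairwise_lt_pyRange_one 2 t)

lemma primesUpto_succ (t : Int) (ht : 2 ≤ t) :
    primesUpto (t + 1) = primesUpto t ++ (if is_prime t then [t] else []) := by
  unfold primesUpto
  rw [PySem.List.pyRange_one_succ_right ht, List.filter_append]
  cases h : is_prime t <;> simp [h]

lemma trial_eq (t : Int) (ht : 2 ≤ t) :
    trial_composite (primesUpto t) t = !is_prime t := by
  cases hp : is_prime t with
  | true =>
    have hfalse : trial_composite (primesUpto t) t = false :=
      trial_composite_false t (primesUpto t) (fun q hq hqq hdvd =>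
        (is_prime_iff t ht).mp hp q ((mem_primesUpto t q).mp hq).1.1 hqq hdvd)
    rw [hfalse]
    rfl
  | false =>
    have hnSF : ¬ smallFree t := fun h => by
      rw [(is_prime_iff t ht).mpr h] at hp
      cases hp
    unfold smallFree at hnSF
    push Not at hnSF
    obtain ⟨d, hd2, hdd, hdvd⟩ := hnSF
    have htn : ((t.toNat : Int)) = t := by omega
    have hd1 : ((d.toNat : Int)) = d := by omega
    have hex : ∃ j : Nat, 2 ≤ j ∧ j * j ≤ t.toNat ∧ j ∣ t.toNat := by
      refine ⟨d.toNat, by omega, ?_, ?_⟩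
      · have : ((d.toNat * d.toNat : Nat) : Int) ≤ ((t.toNat : Nat) : Int) := by
          push_cast
          rw [hd1, htn]
          exact hdd
        exact_mod_cast this
      · exact Int.natCast_dvd_natCast.mp (by rw [hd1, htn]; exact hdvd)
    obtain ⟨q0, hs1, hs2, hs3, hmin0⟩ :
        ∃ q0 : Nat, 2 ≤ q0 ∧ q0 * q0 ≤ t.toNat ∧ q0 ∣ t.toNat ∧
          ∀ j < q0, ¬(2 ≤ j ∧ j * j ≤ t.toNat ∧ j ∣ t.toNat) :=
      ⟨Nat.find hex, (Nat.find_spec hex).1, (Nat.find_spec hex).2.1, (Nat.find_spec hex).2.2,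
        fun j hj => Nat.find_min hex hj⟩
    have hq2 : (2 : Int) ≤ (q0 : Int) := by exact_mod_cast hs1
    have hqq : ((q0 : Int)) * (q0 : Int) ≤ t := by
      have h := hs2
      have h2c : ((q0 * q0 : Nat) : Int) ≤ ((t.toNat : Nat) : Int) := by exact_mod_cast h
      push_cast at h2c
      rw [htn] at h2c
      exact h2c
    have hqdvd : ((q0 : Int)) ∣ t := by
      have h2c : ((q0 : Nat) : Int) ∣ ((t.toNat : Nat) : Int) := Int.natCast_dvd_natCast.mpr hs3
      rwa [htn] at h2c
    have hnotP : ∀ x : Int, 2 ≤ x → x * x ≤ t → x ∣ t → x < (q0 : Int) → False := by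
      intro x hx2 hxx hxdvd hxlt
      have hx1 : ((x.toNat : Int)) = x := by omega
      refine hmin0 x.toNat (by omega) ⟨by omega, ?_, ?_⟩
      · have h2c : ((x.toNat * x.toNat : Nat) : Int) ≤ ((t.toNat : Nat) : Int) := by
          push_cast
          rw [hx1, htn]
          exact hxx
        exact_mod_cast h2c
      · exact Int.natCast_dvd_natCast.mp (by rw [hx1, htn]; exact hxdvd)
    have hSFq : smallFree (q0 : Int) := by
      intro e he2 hee hedvd
      have heq : e < (q0 : Int) := by nlinarith
      exact hnotP e he2 (by nlinarith) (dvd_trans hedvd hqdvd) heq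
    have hmem : ((q0 : Int)) ∈ primesUpto t := by
      refine (mem_primesUpto t _).mpr ⟨⟨hq2, by nlinarith⟩, ?_⟩
      exact (is_prime_iff _ hq2).mpr hSFq
    have htrue : trial_composite (primesUpto t) t = true :=
      trial_composite_true t (primesUpto t) (q0 : Int) (pairwise_primesUpto t)
        (fun x hx => ((mem_primesUpto t x).mp hx).1.1) hmem hqq hqdvd
        (fun x hx hxq hxdvd =>
          hnotP x ((mem_primesUpto t x).mp hx).1.1
            (by nlinarith [((mem_primesUpto t x).mp hx).1.1]) hxdvd hxq)
    rw [htrue]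
    rfl

-- ===== the closed-form collision count =====

lemma rint_mem (A B c r : Int) (hc : c ≠ 0) :
    ((rint A B c).1 ≤ r ∧ r ≤ (rint A B c).2) ↔ (A ≤ c * r ∧ c * r ≤ B) := by
  rcases lt_or_gt_of_ne hc with hneg | hpos
  · have hd : (0:Int) < -c := by omega
    rw [rint, if_neg (by omega : ¬ c > 0)]
    have e1 : PySem.Int.floordiv (-B) c = PySem.Int.floordiv B (-c) := by
      have := PySem.Int.floordiv_neg_neg B (-c)
      rwa [neg_neg] at this
    have e2 : PySem.Int.floordiv A c = PySem.Int.floordiv (-A) (-c) := by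
      have := PySem.Int.floordiv_neg_neg (-A) (-c)
      rwa [neg_neg, neg_neg] at this
    simp only [e1, e2]
    have k1 : -(PySem.Int.floordiv B (-c)) ≤ r ↔ c * r ≤ B := by
      rw [neg_le, PySem.Int.le_floordiv_iff_mul_le hd]
      constructor <;> intro h <;> nlinarith
    have k2 : r ≤ PySem.Int.floordiv (-A) (-c) ↔ A ≤ c * r := by
      rw [← not_lt, PySem.Int.floordiv_lt_iff_lt_mul hd, not_lt]
      constructor <;> intro h <;> nlinarith
    rw [k1, k2]
    tauto
  · rw [rint, if_pos (by omega : c > 0)]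
    have k1 : -(PySem.Int.floordiv (-A) c) ≤ r ↔ A ≤ c * r := by
      rw [neg_le, PySem.Int.le_floordiv_iff_mul_le hpos]
      constructor <;> intro h <;> nlinarith
    have k2 : r ≤ PySem.Int.floordiv B c ↔ c * r ≤ B := by
      rw [← not_lt, PySem.Int.floordiv_lt_iff_lt_mul hpos, not_lt]
      constructor <;> intro h <;> nlinarith
    rw [k1, k2]

lemma countP_pyRange_interval_aux (n : Nat) : ∀ (a bnd lo hi : Int), (bnd - a).toNat ≤ n →
    (((PySem.List.pyRange a bnd 1).countP (fun r => decide (lo ≤ r ∧ r ≤ hi))) : Int)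
      = if max a lo ≤ min (bnd - 1) hi then min (bnd - 1) hi - max a lo + 1 else 0 := by
  induction n with
  | zero =>
    intro a bnd lo hi h
    rw [PySem.List.pyRange_one_eq_nil (by omega)]
    rw [if_neg (by omega)]
    simp
  | succ n ih =>
    intro a bnd lo hi h
    by_cases hab : bnd ≤ a
    · rw [PySem.List.pyRange_one_eq_nil hab, if_neg (by omega)]
      simp
    · rw [PySem.List.pyRange_one_cons (by omega), List.countP_cons]
      by_cases hx : lo ≤ a ∧ a ≤ hi
      · have hd : (decide (lo ≤ a ∧ a ≤ hi)) = true := by simp [hx]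
        rw [hd]
        push_cast
        rw [ih (a + 1) bnd lo hi (by omega)]
        simp only [min_def, max_def]
        split_ifs <;> omega
      · have hd : (decide (lo ≤ a ∧ a ≤ hi)) = false := by simpa using hx
        rw [hd]
        push_cast
        rw [ih (a + 1) bnd lo hi (by omega)]
        simp only [min_def, max_def]
        split_ifs <;> omega

lemma countP_pyRange_interval (a bnd lo hi : Int) :
    (((PySem.List.pyRange a bnd 1).countP (fun r => decide (lo ≤ r ∧ r ≤ hi))) : Int)
      = if max a lo ≤ min (bnd - 1) hi then min (bnd - 1) hi - max a lo + 1 else 0 :=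
  countP_pyRange_interval_aux (bnd - a).toNat a bnd lo hi le_rfl
lemma sum_countP_swap (D R : List Int) (f : Int → Int → Bool) (g : Int → Bool)
    (h : ∀ r ∈ R, ((D.countP (fun d => f d r)) : Int) = if g r then 1 else 0) :
    (D.map (fun d => ((R.countP (f d)) : Int))).sum = ((R.countP g) : Int) := by
  induction R with
  | nil => simp
  | cons r R' ih =>
    have step : ∀ d : Int, (((r :: R').countP (f d)) : Int)
        = ((R'.countP (f d)) : Int) + (if f d r then 1 else 0) := by
      intro d
      rw [List.countP_cons]
      push_cast
      rfl
    simp only [step]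
    rw [PySem.List.sum_map_add_int, PySem.List.sum_map_ite_one_zero,
        ih (fun x hx => h x (List.mem_cons_of_mem r hx)),
        h r (List.mem_cons_self), List.countP_cons]
    push_cast
    ring

lemma countP_single (D : List Int) (d0 : Int) (q : Int → Bool)
    (hnd : D.Nodup) (hmem : d0 ∈ D) :
    ((D.countP (fun d => (d == d0) && q d)) : Int) = if q d0 then 1 else 0 := by
  induction D with
  | nil => cases hmem
  | cons x xs ih =>
    rw [List.countP_cons]
    rcases List.mem_cons.mp hmem with heq | hmem'
    · have hz : xs.countP (fun d => (d == d0) && q d) = 0 := by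
        rw [List.countP_eq_zero]
        intro d hd hdq
        have hdd : d = d0 := by
          have := (Bool.and_eq_true _ _).mp hdq
          simpa using this.1
        exact (List.nodup_cons.mp hnd).1 (heq ▸ hdd ▸ hd)
      rw [hz, heq]
      simp
    · have hne : x ≠ d0 := by
        rintro rfl
        exact (List.nodup_cons.mp hnd).1 hmem'
      have hf : ((x == d0) && q x) = false := by simp [hne]
      rw [hf]
      simpa using ih (List.nodup_cons.mp hnd).2 hmem'

lemma closedC_correct (b p : Int) (hb : b ≠ 0) (hp : 2 ≤ p) :
    closedC b (b * b) p = collision_count (PySem.Int.mod b p) p b := by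
  have hp0 : (0:Int) < p := by omega
  have hbb : b * b ≠ 0 := by positivity
  set g : Int → Bool := fun r =>
    (PySem.Int.floordiv (b * r) p
      == PySem.Int.floordiv (b * (PySem.Int.mod (PySem.Int.mod b p * r) p)) p) with hg
  set f : Int → Int → Bool := fun d r =>
    decide ((d * p ≤ b * r ∧ b * r ≤ (d + 1) * p - 1) ∧
      (d * p * (b + 1) ≤ b * b * r ∧ b * b * r ≤ d * p * (b + 1) + p - 1)) with hf
  -- A's loop is a count
  have hA : collision_count (PySem.Int.mod b p) p b
      = ((PySem.List.pyRange 1 p 1).countP g : Int) := by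
    have e : collision_count (PySem.Int.mod b p) p b
        = (PySem.List.pyRange 1 p 1).foldl (fun count r => if g r then count + 1 else count) 0 := rfl
    rw [e, PySem.List.foldl_if_add_one]
    simp
  -- B's loop is a sum of interval lengths = sum of counts
  have hB : closedC b (b * b) p = ((dsOf b).map (fun d => ((PySem.List.pyRange 1 p 1).countP (f d) : Int))).sum := by
    have e : closedC b (b * b) p
        = (dsOf b).foldl (fun C d =>
            C + (if max 1 (max (rint (d * p) ((d + 1) * p - 1) b).1
                    (rint (d * p * (b + 1)) (d * p * (b + 1) + p - 1) (b * b)).1)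
                  ≤ min (p - 1) (min (rint (d * p) ((d + 1) * p - 1) b).2
                    (rint (d * p * (b + 1)) (d * p * (b + 1) + p - 1) (b * b)).2)
                then min (p - 1) (min (rint (d * p) ((d + 1) * p - 1) b).2
                    (rint (d * p * (b + 1)) (d * p * (b + 1) + p - 1) (b * b)).2)
                  - max 1 (max (rint (d * p) ((d + 1) * p - 1) b).1
                    (rint (d * p * (b + 1)) (d * p * (b + 1) + p - 1) (b * b)).1) + 1
                else 0)) 0 := by
      rw [closedC]
      apply PySem.List.foldl_congr_mem
      intro acc d _
      simp only
      split_ifs <;> omega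
    rw [e, PySem.List.foldl_add]
    rw [zero_add]
    congr 1
    apply List.map_congr_left
    intro d _
    -- per-d: count of the two-interval conjunction
    have hcong : (PySem.List.pyRange 1 p 1).countP (f d)
        = (PySem.List.pyRange 1 p 1).countP (fun r =>
            decide (max (rint (d * p) ((d + 1) * p - 1) b).1
                (rint (d * p * (b + 1)) (d * p * (b + 1) + p - 1) (b * b)).1 ≤ r ∧
              r ≤ min (rint (d * p) ((d + 1) * p - 1) b).2
                (rint (d * p * (b + 1)) (d * p * (b + 1) + p - 1) (b * b)).2)) := by
      apply List.countP_congr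
      intro r _
      rw [hf]
      simp only [decide_eq_true_eq]
      rw [← rint_mem _ _ _ _ hb, ← rint_mem _ _ _ _ hbb]
      simp only [min_def, max_def]
      split_ifs <;> omega
    rw [hcong, countP_pyRange_interval]
  -- swap the sum
  rw [hA, hB]
  apply sum_countP_swap
  intro r hr
  rw [PySem.List.mem_pyRange_one] at hr
  obtain ⟨hr1, hr2⟩ := hr
  -- per-r: D counts exactly the d = (b*r)//p, and there f agrees with g
  set d0 : Int := PySem.Int.floordiv (b * r) p with hd0
  set s : Int := PySem.Int.mod (b * r) p with hs
  have hsum : d0 * p + s = b * r := PySem.Int.floordiv_mul_add_mod (b * r) p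
  have hs0 : 0 ≤ s := PySem.Int.mod_nonneg (b * r) hp0
  have hsp : s < p := PySem.Int.mod_lt (b * r) hp0
  -- the inner mod chain reduces to s
  have hmodeq : PySem.Int.mod (PySem.Int.mod b p * r) p = s := by
    rw [hs, PySem.Int.mod_eq_emod_of_pos hp0, PySem.Int.mod_eq_emod_of_pos hp0,
        PySem.Int.mod_eq_emod_of_pos hp0]
    conv_rhs => rw [Int.mul_emod]
    rw [Int.mul_emod (b % p) r, Int.emod_emod_of_dvd _ dvd_rfl]
  -- f d r splits into (d == d0) && J d
  have hsplit : ∀ d : Int, f d r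
      = ((d == d0) && decide (d * p * (b + 1) ≤ b * b * r ∧ b * b * r ≤ d * p * (b + 1) + p - 1)) := by
    intro d
    simp only [hf]
    have hiff : (d * p ≤ b * r ∧ b * r ≤ (d + 1) * p - 1) ↔ d = d0 := by
      rw [hd0]
      constructor
      · intro h
        symm
        rw [PySem.Int.floordiv_eq_iff_of_pos hp0]
        exact ⟨h.1, by omega⟩
      · intro h
        have := (PySem.Int.floordiv_eq_iff_of_pos hp0).mp h.symm
        exact ⟨this.1, by omega⟩
    rw [show (decide ((d * p ≤ b * r ∧ b * r ≤ (d + 1) * p - 1) ∧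
        (d * p * (b + 1) ≤ b * b * r ∧ b * b * r ≤ d * p * (b + 1) + p - 1)))
      = (decide (d * p ≤ b * r ∧ b * r ≤ (d + 1) * p - 1) &&
        decide (d * p * (b + 1) ≤ b * b * r ∧ b * b * r ≤ d * p * (b + 1) + p - 1)) from by
        simp]
    have e1 : decide (d * p ≤ b * r ∧ b * r ≤ (d + 1) * p - 1) = (d == d0) := by
      rw [Bool.eq_iff_iff]
      simp only [decide_eq_true_eq, beq_iff_eq]
      exact ⟨fun h => hiff.mp ⟨h.1, by omega⟩, fun h => ⟨(hiff.mpr h).1, by omega⟩⟩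
    rw [e1]
  have hDnd : (dsOf b).Nodup := by
    rw [dsOf]
    split_ifs <;> exact PySem.List.nodup_pyRange_one _ _
  have hDmem : d0 ∈ dsOf b := by
    rw [dsOf, hd0]
    rcases lt_or_gt_of_ne hb with hneg | hpos
    · rw [if_neg (by omega), PySem.List.mem_pyRange_one]
      constructor
      · rw [PySem.Int.le_floordiv_iff_mul_le hp0]
        nlinarith
      · rw [PySem.Int.floordiv_lt_iff_lt_mul hp0]
        nlinarith
    · rw [if_pos hpos, PySem.List.mem_pyRange_one]
      constructor
      · rw [PySem.Int.le_floordiv_iff_mul_le hp0]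
        nlinarith
      · rw [PySem.Int.floordiv_lt_iff_lt_mul hp0]
        nlinarith
  have hkey : b * s = b * b * r - d0 * p * b := by linear_combination b * hsum
  have hqg : (decide (d0 * p * (b + 1) ≤ b * b * r ∧ b * b * r ≤ d0 * p * (b + 1) + p - 1)) = g r := by
    rw [hg]
    simp only [hmodeq]
    have e1 : d0 * p * (b + 1) = d0 * p * b + d0 * p := by ring
    have hgr : (PySem.Int.floordiv (b * r) p == PySem.Int.floordiv (b * s) p)
        = decide (PySem.Int.floordiv (b * s) p = d0) := by
      rw [← hd0, Bool.eq_iff_iff]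
      simp only [beq_iff_eq, decide_eq_true_eq]
      exact eq_comm
    rw [hgr]
    simp only [decide_eq_decide]
    rw [PySem.Int.floordiv_eq_iff_of_pos hp0]
    constructor
    · rintro ⟨h1, h2⟩
      constructor <;> nlinarith
    · rintro ⟨h1, h2⟩
      constructor <;> nlinarith
  calc (((dsOf b).countP (fun d => f d r)) : Int)
      = (((dsOf b).countP (fun d => (d == d0) &&
          decide (d * p * (b + 1) ≤ b * b * r ∧ b * b * r ≤ d * p * (b + 1) + p - 1))) : Int) := by
        congr 1
        apply List.countP_congr
        intro d _
        rw [hsplit d]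
    _ = if decide (d0 * p * (b + 1) ≤ b * b * r ∧ b * b * r ≤ d0 * p * (b + 1) + p - 1) then 1 else 0 :=
        countP_single (dsOf b) d0 _ hDnd hDmem
    _ = if g r then 1 else 0 := by rw [hqg]

def stepA (b : Int) : PySem.Dict Int Int → Int → PySem.Dict Int Int :=
  fun table p =>
    if !is_prime p || PySem.Int.mod p b == 0 then table
    else
      let a := PySem.Int.mod p (b * b)
      if table.contains a then table
      else
        let g := PySem.Int.powMod b 1 p
        let C := collision_count g p b
        let Q := PySem.Int.floordiv (p - 1) b
        table.insert a (C - Q)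

def stepB (b : Int) : (List Int × PySem.Dict Int Int) → Int → (List Int × PySem.Dict Int Int) :=
  fun st p =>
    if trial_composite st.1 p then st
    else
      let primes := st.1 ++ [p]
      if p ≤ b * b || PySem.Int.mod p b == 0 then (primes, st.2)
      else
        let a := PySem.Int.mod p (b * b)
        if st.2.contains a then (primes, st.2)
        else
          let C := closedC b (b * b) p
          (primes, st.2.insert a (C - PySem.Int.floordiv (p - 1) b))

lemma A_eq (b mp : Int) :
    compute_S_table b mp
      = (((PySem.List.pyRange (b * b + 1) mp 1).foldl (stepA b) PySem.Dict.empty).items, b * b) := rfl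

lemma B_eq (b mp : Int) (h : ¬ mp ≤ b * b + 1) :
    compute_S_table_alt b mp
      = (((PySem.List.pyRange 2 mp 1).foldl (stepB b) ([], PySem.Dict.empty)).2.items, b * b) := by
  rw [compute_S_table_alt]
  simp only [if_neg h]
  rfl

lemma B_eq_small (b mp : Int) (h : mp ≤ b * b + 1) :
    compute_S_table_alt b mp = ((PySem.Dict.empty : PySem.Dict Int Int).items, b * b) := by
  rw [compute_S_table_alt]
  simp only [if_pos h]

lemma main_inv (b : Int) (hb : b ≠ 0) (k : Nat) :
    (PySem.List.pyRange 2 (2 + (k : Int)) 1).foldl (stepB b) ([], PySem.Dict.empty)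
      = (primesUpto (2 + (k : Int)),
         (PySem.List.pyRange (b * b + 1) (2 + (k : Int)) 1).foldl (stepA b) PySem.Dict.empty) := by
  have hbb : 1 ≤ b * b := by have := mul_self_pos.mpr hb; omega
  induction k with
  | zero =>
    simp only [Nat.cast_zero, add_zero]
    rw [PySem.List.pyRange_one_eq_nil (le_refl (2:Int)),
        PySem.List.pyRange_one_eq_nil (by omega : (2:Int) ≤ b * b + 1)]
    simp [primesUpto, PySem.List.pyRange_one_eq_nil (le_refl (2:Int))]
  | succ k ih =>
    have hcast : (2 : Int) + ((k + 1 : Nat) : Int) = (2 + (k : Int)) + 1 := by push_cast; ring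
    rw [hcast]
    have ht2 : (2:Int) ≤ 2 + (k : Int) := by omega
    rw [PySem.List.pyRange_one_succ_right ht2, List.foldl_append, ih,
        primesUpto_succ _ ht2]
    set t : Int := 2 + (k : Int) with htdef
    by_cases hp : is_prime t
    · -- t is prime
      have htr : trial_composite (primesUpto t) t = false := by
        rw [trial_eq t ht2, hp]
        rfl
      by_cases hm : t ≤ b * b
      · rw [PySem.List.pyRange_one_eq_nil (by omega : t + 1 ≤ b * b + 1),
            PySem.List.pyRange_one_eq_nil (by omega : t ≤ b * b + 1)] at *
        simp [stepB, htr, hp, hm]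
      · rw [PySem.List.pyRange_one_succ_right (by omega : b * b + 1 ≤ t)]
        simp only [List.foldl_cons, List.foldl_nil]
        by_cases hmod : PySem.Int.mod t b = 0
        · simp [stepB, stepA, htr, hp, hm, hmod]
        · have hpow : PySem.Int.powMod b 1 t = PySem.Int.mod b t := by
            simp [PySem.Int.powMod]
          have hC := closedC_correct b t hb ht2
          by_cases hcont : ((PySem.List.pyRange (b * b + 1) t 1).foldl (stepA b)
              PySem.Dict.empty).contains (PySem.Int.mod t (b * b))
          · simp [stepB, stepA, htr, hp, hm, hmod, hcont]
          · simp [stepB, stepA, htr, hp, hm, hmod, hcont, hpow, hC]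
    · -- t is composite: everything unchanged
      have hp' : is_prime t = false := by simpa using hp
      have htr : trial_composite (primesUpto t) t = true := by
        rw [trial_eq t ht2, hp']
        rfl
      have htab : (PySem.List.pyRange (b * b + 1) (t + 1) 1).foldl (stepA b) PySem.Dict.empty
          = (PySem.List.pyRange (b * b + 1) t 1).foldl (stepA b) PySem.Dict.empty := by
        by_cases hm : b * b + 1 ≤ t
        · rw [PySem.List.pyRange_one_succ_right hm, List.foldl_append]
          simp [stepA, hp']
        · rw [PySem.List.pyRange_one_eq_nil (by omega : t + 1 ≤ b * b + 1),
              PySem.List.pyRange_one_eq_nil (by omega : t ≤ b * b + 1)]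
      rw [htab]
      simp [stepB, htr, hp']

-- ===== VERDICT (by name: the statement is the Claim_ definition above) =====
theorem compute_S_table_spec : Claim_equal_compute_S_table := by
  intro b mp _ hpre
  show compute_S_table b mp = compute_S_table_alt b mp
  by_cases hg : mp ≤ b * b + 1
  · rw [A_eq, B_eq_small b mp hg, PySem.List.pyRange_one_eq_nil hg]
    rfl
  · rw [A_eq, B_eq b mp hg]
    by_cases hb : b = 0
    · -- then mp = 2 (Pre_ gives mp ≤ 2, the guard gives mp > 1)
      subst hb
      rcases hpre with h | h
      · exact absurd rfl h
      · have hmp : mp = 2 := by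
          have : ¬ mp ≤ 0 * 0 + 1 := hg
          omega
        subst hmp
        rw [PySem.List.pyRange_one_eq_nil (le_refl (2:Int))]
        rw [show (0:Int) * 0 + 1 = 1 from by norm_num,
            show PySem.List.pyRange (1:Int) 2 1 = [1] from by decide]
        simp [stepA, is_prime]
    · have hbb : 1 ≤ b * b := by have := mul_self_pos.mpr hb; omega
      have hk : mp = 2 + ((mp - 2).toNat : Int) := by omega
      rw [hk, main_inv b hb]
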